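-- pv_equiv track=rewrite | github.com/veerababu74/uphire_v2 | apis/skills.py | combine_skills
-- ===== SOURCE A (Python) =====
-- def combine_skills(json_skills_list, db_skills_list):
--     """Combine skills from both sources and remove duplicates case-insensitively"""
--     all_skills = json_skills_list + db_skills_list
--     seen_lower = set()
--     unique_combined = []
--     for skill in all_skills:
--         skill_lower = skill.lower()
--         if skill_lower not in seen_lower:
--             seen_lower.add(skill_lower)
--             unique_combined.append(skill)
--     return unique_combined
-- ===== SOURCE B (Python) =====
-- def combine_skills(json_skills_list, db_skills_list):
--     """Combine skills from both sources and remove duplicates case-insensitively"""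
--     remaining = json_skills_list + db_skills_list
--     unique_combined = []
--     while remaining:
--         head = remaining[0]
--         unique_combined.append(head)
--         head_lower = head.lower()
--         remaining = [s for s in remaining[1:] if s.lower() != head_lower]
--     return unique_combined
-- ===== Notes on version B (the rewrite author's own statement) =====
-- stated objective: alternative
-- what changed: Replaces the seen-set single pass by a select-and-purge sweep: repeatedly emit the first remaining skill and filter every case-insensitive duplicate of it out of the remainder, so no membership structure exists and the input itself shrinks.
import Mathlib
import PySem

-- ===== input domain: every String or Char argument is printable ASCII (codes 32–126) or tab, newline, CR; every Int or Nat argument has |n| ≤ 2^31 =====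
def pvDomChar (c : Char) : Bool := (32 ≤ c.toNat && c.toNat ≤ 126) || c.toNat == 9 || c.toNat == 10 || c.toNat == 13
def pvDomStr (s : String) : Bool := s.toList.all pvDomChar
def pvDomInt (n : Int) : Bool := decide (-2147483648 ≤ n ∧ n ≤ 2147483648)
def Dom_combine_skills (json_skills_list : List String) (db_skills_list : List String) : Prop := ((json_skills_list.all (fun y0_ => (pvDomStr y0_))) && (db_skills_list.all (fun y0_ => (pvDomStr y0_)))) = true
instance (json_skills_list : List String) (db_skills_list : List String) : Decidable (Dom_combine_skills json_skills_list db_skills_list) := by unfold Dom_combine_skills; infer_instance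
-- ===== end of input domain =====

-- ===== PORT A =====
-- B replaces the seen-set pass by a select-and-purge sweep on the shrinking input (no speed claim).
def combineA_go : List String → PySem.Set String → List String → List String
  | [], _, unique_combined => unique_combined
  | skill :: rest, seen_lower, unique_combined =>
    let skill_lower := PySem.Str.lower skill
    if PySem.Set.contains seen_lower skill_lower then
      combineA_go rest seen_lower unique_combined
    else
      combineA_go rest (PySem.Set.add seen_lower skill_lower) (unique_combined ++ [skill])

def combine_skills (json_skills_list : List String) (db_skills_list : List String) : List String :=
  combineA_go (json_skills_list ++ db_skills_list) PySem.Set.empty []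

-- ===== PORT B =====
-- while remaining: emit head, purge all case-insensitive duplicates of it from the rest
def combineB_go : List String → List String → List String
  | [], unique_combined => unique_combined
  | head :: rest, unique_combined =>
    combineB_go (rest.filter (fun s => PySem.Str.lower s != PySem.Str.lower head))
      (unique_combined ++ [head])
termination_by l _ => l.length
decreasing_by simpa using Nat.lt_succ_of_le (List.length_filter_le _ _)

def combine_skills_alt (json_skills_list : List String) (db_skills_list : List String) : List String :=
  combineB_go (json_skills_list ++ db_skills_list) []

-- ===== PRECONDITION & SPEC =====
def Spec_combine_skills (json_skills_list : List String) (db_skills_list : List String) (out : List String) : Prop := out = combine_skills_alt json_skills_list db_skills_list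
instance (json_skills_list : List String) (db_skills_list : List String) (out : List String) : Decidable (Spec_combine_skills json_skills_list db_skills_list out) := by unfold Spec_combine_skills; infer_instance

-- ===== CLAIM =====
def Claim_equal_combine_skills : Prop := ∀ (json_skills_list : List String) (db_skills_list : List String), Dom_combine_skills json_skills_list db_skills_list → Spec_combine_skills json_skills_list db_skills_list (combine_skills json_skills_list db_skills_list)

-- ===== LEMMAS AND PROOFS =====
-- A's pass over l with seen-set `seen` equals B's sweep over l with the already-seen
-- lowercase forms filtered out up front.
theorem combine_go_eq (l : List String) :
    ∀ (seen : PySem.Set String) (out : List String),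
      combineA_go l seen out
        = combineB_go (l.filter (fun s => !PySem.Set.contains seen (PySem.Str.lower s))) out := by
  induction l with
  | nil => intro seen out; simp [combineA_go, combineB_go]
  | cons skill rest ih =>
    intro seen out
    simp only [combineA_go, List.filter_cons]
    by_cases hc : PySem.Set.contains seen (PySem.Str.lower skill) = true
    · simp only [hc, if_true, Bool.not_true, Bool.false_eq_true, if_false]
      exact ih seen out
    · have hc' : PySem.Set.contains seen (PySem.Str.lower skill) = false :=
        eq_false_of_ne_true hc
      simp only [hc', Bool.false_eq_true, if_false, Bool.not_false, if_true]
      rw [combineB_go, List.filter_filter, ih]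
      have hadd : PySem.Set.add seen (PySem.Str.lower skill) = seen ++ [PySem.Str.lower skill] := by
        simp only [PySem.Set.add, hc', Bool.false_eq_true, if_false]
      rw [hadd]
      congr 1
      apply List.filter_congr
      intro s _
      simp only [PySem.Set.contains, List.contains_eq_any_beq, List.any_append,
        List.any_cons, List.any_nil, Bool.or_false, Bool.not_or, bne]
      exact Bool.and_comm _ _

-- ===== VERDICT =====
theorem combine_skills_spec : Claim_equal_combine_skills := by
  intro j d _
  unfold Spec_combine_skills combine_skills combine_skills_alt
  rw [combine_go_eq]
  congr 1
  simp [PySem.Set.empty, PySem.Set.contains]
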